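-- pv_equiv track=rewrite | github.com/dabigail2107/GenePredictionHMM | source/format_data.py | per_position_sets
-- ===== SOURCE A (Python) =====
-- from typing import Dict, List, Tuple
--
-- def per_position_sets(g_tracks: List[str]) -> List[set]:
--     """Merge transcript letters per position into sets (ignore '#')"""
--     dna = g_tracks[0]
--     L = len(dna)
--     pos_sets: List[set] = []
--     for i in range(L):
--         s = set()
--         for t in g_tracks[1:]:
--             if t and i < len(t):
--                 c = t[i]
--                 if c != '#':
--                     s.add(c)
--         pos_sets.append(s if s else {'-'})
--     return pos_sets
-- ===== SOURCE B (Python) =====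
-- def per_position_sets(g_tracks):
--     """Merge transcript letters per position into sets (ignore '#')"""
--     # pairwise zip-merge: fold each track into the row of sets without any indexing
--     merged = [set() for _ in g_tracks[0]]
--     for t in g_tracks[1:]:
--         paired = [s if c == '#' else s | {c} for s, c in zip(merged, t)]
--         merged = paired + merged[len(paired):]
--     return [s or {'-'} for s in merged]
-- ===== Notes on version B (the rewrite author's own statement) =====
-- stated objective: alternative
-- what changed: Replaced the per-position rescans over all tracks by a fold that pairwise zip-merges each track into the running row of sets (no indices, zip truncation replaces the i<len(t) guard), with a separate final pass filling '-' defaults.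
import Mathlib
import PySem

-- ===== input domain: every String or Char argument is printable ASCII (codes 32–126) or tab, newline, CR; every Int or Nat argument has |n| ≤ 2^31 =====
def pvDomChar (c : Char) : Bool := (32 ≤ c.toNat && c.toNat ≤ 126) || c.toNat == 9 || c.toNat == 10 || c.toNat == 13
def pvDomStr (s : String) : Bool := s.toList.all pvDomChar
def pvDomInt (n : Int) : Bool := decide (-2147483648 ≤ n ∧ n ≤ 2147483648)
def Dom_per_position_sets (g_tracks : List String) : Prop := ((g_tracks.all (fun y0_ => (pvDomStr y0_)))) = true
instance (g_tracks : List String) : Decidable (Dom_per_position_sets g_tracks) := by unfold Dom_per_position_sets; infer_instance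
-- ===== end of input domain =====

-- B folds each track into the running row of sets by a pairwise zip-merge (no position
-- indexing; zip truncation replaces the bounds guards), then fills '-' defaults in a
-- separate final pass — an alternative decomposition, not claimed faster.

-- ===== PORT A =====
def per_position_sets (g_tracks : List String) : List (List String) :=
  match g_tracks with
  | [] => []        -- Python raises IndexError here; excluded by Pre_
  | dna :: _ =>
    let L := dna.toList.length
    (List.range L).foldl (fun pos_sets i =>
      let s : PySem.Set String :=
        (g_tracks.drop 1).foldl (fun s t =>
          if t.toList ≠ [] ∧ i < t.toList.length then
            -- c = t[i], in range by the guard; inlined below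
            if t.toList.getD i ' ' ≠ '#' then PySem.Set.add s (String.ofList [t.toList.getD i ' ']) else s
          else s) PySem.Set.empty
      pos_sets ++ [if s = [] then ["-"] else s]) []

-- ===== PORT B =====
def per_position_sets_alt (g_tracks : List String) : List (List String) :=
  match g_tracks with
  | [] => []        -- Python raises IndexError here; excluded by Pre_
  | dna :: rest =>
    let merged := rest.foldl (fun merged t =>
      let paired := (merged.zip t.toList).map (fun sc =>
        if sc.2 = '#' then sc.1 else PySem.Set.add sc.1 (String.ofList [sc.2]))
      paired ++ merged.drop paired.length) (List.replicate dna.toList.length PySem.Set.empty)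
    merged.map (fun s => if s = [] then ["-"] else s)

-- ===== PRECONDITION & SPEC =====
-- Pre_ excludes only the empty list, on which Python A raises IndexError (g_tracks[0]).
def Pre_per_position_sets (g_tracks : List String) : Prop := g_tracks ≠ []
instance (g_tracks : List String) : Decidable (Pre_per_position_sets g_tracks) := by
  unfold Pre_per_position_sets; infer_instance
def pvWitness_per_position_sets : List String := ["ACG", "A#C", "-G"]
def Spec_per_position_sets (g_tracks : List String) (out : List (List String)) : Prop := out = per_position_sets_alt g_tracks
instance (g_tracks : List String) (out : List (List String)) : Decidable (Spec_per_position_sets g_tracks out) := by unfold Spec_per_position_sets; infer_instance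

-- ===== CLAIM (what is proved, stated in full; the proofs are below) =====
def Claim_equal_per_position_sets : Prop := ∀ (g_tracks : List String), Dom_per_position_sets g_tracks → Pre_per_position_sets g_tracks → Spec_per_position_sets g_tracks (per_position_sets g_tracks)

-- ===== LEMMAS AND PROOFS =====

-- the per-position accumulation both programs perform, as a fold over the tracks
def pvCollect (j : Nat) (s : List String) (t : String) : List String :=
  if j < t.toList.length ∧ t.toList.getD j ' ' ≠ '#' then
    PySem.Set.add s (String.ofList [t.toList.getD j ' '])
  else s

def pvFix (s : List String) : List String := if s = [] then ["-"] else s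

-- B's zip-merge step, named
def pvMergeStep (ss : List (List String)) (t : String) : List (List String) :=
  let paired := (ss.zip t.toList).map (fun sc =>
    if sc.2 = '#' then sc.1 else PySem.Set.add sc.1 (String.ofList [sc.2]))
  paired ++ ss.drop paired.length

theorem pvMergeStep_length (ss : List (List String)) (t : String) :
    (pvMergeStep ss t).length = ss.length := by
  unfold pvMergeStep
  simp only [List.length_append, List.length_map, List.length_zip, List.length_drop]
  omega

theorem pvMergeStep_getD (ss : List (List String)) (t : String) (j : Nat)
    (hj : j < ss.length) :
    (pvMergeStep ss t).getD j [] = pvCollect j (ss.getD j []) t := by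
  unfold pvMergeStep pvCollect
  simp only []
  have hplen : ((ss.zip t.toList).map (fun sc =>
      if sc.2 = '#' then sc.1 else PySem.Set.add sc.1 (String.ofList [sc.2]))).length
      = min ss.length t.toList.length := by
    rw [List.length_map, List.length_zip]
  by_cases hm : j < t.toList.length
  · have hjp : j < ((ss.zip t.toList).map (fun sc =>
        if sc.2 = '#' then sc.1 else PySem.Set.add sc.1 (String.ofList [sc.2]))).length := by
      rw [hplen]; omega
    rw [List.getD_eq_getElem?_getD, List.getElem?_append_left hjp,
        List.getElem?_eq_getElem hjp, Option.getD_some]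
    simp only [List.getElem_map, List.getElem_zip]
    have h1 : ss.getD j [] = ss[j] := by
      rw [List.getD_eq_getElem?_getD, List.getElem?_eq_getElem hj, Option.getD_some]
    have h2 : t.toList.getD j ' ' = t.toList[j] := by
      rw [List.getD_eq_getElem?_getD, List.getElem?_eq_getElem hm, Option.getD_some]
    rw [h1, h2]
    by_cases hc : t.toList[j] = '#'
    · rw [if_pos hc, if_neg (by simp [hc])]
    · rw [if_neg hc, if_pos ⟨hm, hc⟩]
  · rw [List.getD_eq_getElem?_getD, List.getElem?_append_right (by rw [hplen]; omega), hplen]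
    have hmin : min ss.length t.toList.length = t.toList.length := by omega
    rw [hmin, List.getElem?_drop]
    have h3 : t.toList.length + (j - t.toList.length) = j := by omega
    rw [h3, ← List.getD_eq_getElem?_getD,
        if_neg (by rintro ⟨h, _⟩; omega)]

theorem pvFold_merge_length (ts : List String) (ps : List (List String)) :
    (ts.foldl pvMergeStep ps).length = ps.length := by
  induction ts generalizing ps with
  | nil => rfl
  | cons t ts ih => rw [List.foldl_cons, ih, pvMergeStep_length]

theorem pvFold_merge_getD (ts : List String) (ps : List (List String))
    (j : Nat) (hj : j < ps.length) :
    (ts.foldl pvMergeStep ps).getD j [] = ts.foldl (pvCollect j) (ps.getD j []) := by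
  induction ts generalizing ps with
  | nil => rfl
  | cons t ts ih =>
    simp only [List.foldl_cons]
    rw [ih (pvMergeStep ps t) (by rw [pvMergeStep_length]; exact hj),
        pvMergeStep_getD ps t j hj]

-- foldl-append builds the map
theorem pv_foldl_append {α β : Type} (f : α → β) (l : List α) (a : List β) :
    l.foldl (fun acc x => acc ++ [f x]) a = a ++ l.map f := by
  induction l generalizing a with
  | nil => simp
  | cons x xs ih => simp [ih, List.foldl_cons]

-- A's inner loop body is pvCollect (the 't ≠ ""' test is implied by 'i < len(t)')
theorem pvInnerFun_eq (j : Nat) :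
    (fun (s : List String) (t : String) =>
      if t.toList ≠ [] ∧ j < t.toList.length then
        if t.toList.getD j ' ' ≠ '#' then PySem.Set.add s (String.ofList [t.toList.getD j ' ']) else s
      else s) = pvCollect j := by
  funext s t
  unfold pvCollect
  by_cases h1 : j < t.toList.length
  · have hne : t.toList ≠ [] := by intro h; rw [h] at h1; simp at h1
    rw [if_pos ⟨hne, h1⟩]
    by_cases h2 : t.toList.getD j ' ' ≠ '#'
    · rw [if_pos h2, if_pos ⟨h1, h2⟩]
    · rw [if_neg h2, if_neg (by rintro ⟨_, h⟩; exact h2 h)]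
  · rw [if_neg (by rintro ⟨_, h⟩; exact h1 h), if_neg (by rintro ⟨h, _⟩; exact h1 h)]

theorem pv_foldl_ext {α β : Type} (f g : β → α → β) (l : List α) (init : β)
    (h : ∀ b a, f b a = g b a) : l.foldl f init = l.foldl g init := by
  induction l generalizing init with
  | nil => rfl
  | cons x xs ih => rw [List.foldl_cons, List.foldl_cons, h, ih]

theorem pvA_eq (dna : String) (rest : List String) :
    per_position_sets (dna :: rest)
      = (List.range dna.toList.length).map (fun j => pvFix (rest.foldl (pvCollect j) [])) := by
  show (List.range dna.toList.length).foldl _ [] = _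
  rw [pv_foldl_ext _ (fun (acc : List (List String)) i =>
        acc ++ [pvFix (rest.foldl (pvCollect i) [])]) _ _ (by
      intro b i
      simp only [List.drop_succ_cons, List.drop_zero]
      rw [pvInnerFun_eq i]
      rfl)]
  rw [pv_foldl_append (fun i => pvFix (rest.foldl (pvCollect i) [])), List.nil_append]

theorem pvB_eq (dna : String) (rest : List String) :
    per_position_sets_alt (dna :: rest)
      = (List.range dna.toList.length).map (fun j => pvFix (rest.foldl (pvCollect j) [])) := by
  show (rest.foldl pvMergeStep
          (List.replicate dna.toList.length PySem.Set.empty)).map pvFix = _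
  apply List.ext_getElem
  · simp [pvFold_merge_length]
  · intro i h1 h2
    have h1' : i < (rest.foldl pvMergeStep
        (List.replicate dna.toList.length PySem.Set.empty)).length := by
      simpa using h1
    have hi : i < dna.toList.length := by
      rwa [pvFold_merge_length, List.length_replicate] at h1'
    simp only [List.getElem_map, List.getElem_range]
    have hd : (rest.foldl pvMergeStep
        (List.replicate dna.toList.length PySem.Set.empty))[i]'h1'
        = (rest.foldl pvMergeStep
        (List.replicate dna.toList.length PySem.Set.empty)).getD i [] := by
      rw [List.getD_eq_getElem?_getD, List.getElem?_eq_getElem h1']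
      rfl
    rw [hd, pvFold_merge_getD _ _ i (by simpa using hi),
        List.getD_eq_getElem?_getD, List.getElem?_replicate_of_lt hi]
    rfl

-- ===== VERDICT (by name: the statement is the Claim_ definition above) =====
theorem per_position_sets_spec : Claim_equal_per_position_sets := by
  intro g_tracks _ hpre
  unfold Spec_per_position_sets
  match g_tracks with
  | [] => exact absurd rfl hpre
  | dna :: rest => rw [pvA_eq, pvB_eq]
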